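-- pv_equiv track=rewrite | github.com/twotwoiscute/deep_detection | core/utils/reinterpret.py | reinterpret_request_datatypes
-- ===== SOURCE A (Python) =====
-- from typing import Optional, List, Tuple, Dict
--
-- DETECTION_DATA_TYPES_LUT = {
--     0: "CLASSIFICATION_INFO",
--     1: "BBOX",
--     2: "MASK",
--     100: "CONTOURS",
-- }
--
-- def reinterpret_request_datatypes(
--     data_types: List[int],
-- ) -> Optional[Dict[str, bool]]:
--     """Reinterprete data types fetched from ros msg to meaningful values.
--
--     The rules are:
--         1. If data types are empty, return None, meaning return everything
--         that is in detection results.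
--         2. If not empty, will convert the numbers to a dict, for example:
--             return = {
--                 "CLASSIFICATION_INFO": True,
--                 "BBOX": True,
--                 "MASK": True,
--                 "CONTOURS": False,
--             }
--
--     Parameters
--     ---------
--         data_types: List
--
--     Returns
--     -------
--     Optional[Dict[str, bool]]
--         A dict indication the types needed from detection results.
--     """
--
--     default_dict = {
--         "CLASSIFICATION_INFO": False,
--         "BBOX": False,
--         "MASK": False,
--         "CONTOURS": False,
--     }
--
--     if not data_types:
--         return None
--     for value in data_types:
--         if value in DETECTION_DATA_TYPES_LUT:
--             default_dict[DETECTION_DATA_TYPES_LUT[value]] = True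
--     return default_dict
-- ===== SOURCE B (Python) =====
-- from typing import Optional, List, Dict
--
-- DETECTION_DATA_TYPES_LUT = {
--     0: "CLASSIFICATION_INFO",
--     1: "BBOX",
--     2: "MASK",
--     100: "CONTOURS",
-- }
--
-- def reinterpret_request_datatypes(
--     data_types: List[int],
-- ) -> Optional[Dict[str, bool]]:
--     if not data_types:
--         return None
--     present = set(data_types)
--     return {name: (key in present) for key, name in DETECTION_DATA_TYPES_LUT.items()}
-- ===== Notes on version B (the rewrite author's own statement) =====
-- stated objective: idiomatic
-- what changed: Instead of mutating a default dict while looping over the input, B builds a set of present codes once and constructs the result by a comprehension over the type table, testing membership.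
import Mathlib
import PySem

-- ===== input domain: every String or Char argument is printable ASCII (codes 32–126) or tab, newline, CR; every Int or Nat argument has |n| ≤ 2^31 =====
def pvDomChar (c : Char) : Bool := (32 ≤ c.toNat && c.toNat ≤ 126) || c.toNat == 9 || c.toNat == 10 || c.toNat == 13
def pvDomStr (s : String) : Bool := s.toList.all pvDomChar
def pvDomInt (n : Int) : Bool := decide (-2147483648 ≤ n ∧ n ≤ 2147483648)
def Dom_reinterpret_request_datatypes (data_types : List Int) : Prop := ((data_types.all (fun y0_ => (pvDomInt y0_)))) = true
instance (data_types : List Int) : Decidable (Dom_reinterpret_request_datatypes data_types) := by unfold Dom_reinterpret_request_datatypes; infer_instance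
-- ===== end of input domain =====

-- B replaces the flag-mutating loop over the input by one membership-tested pass over the type table (idiomatic).
-- ===== PORT A =====
def pvLUT : PySem.Dict Int String :=
  ⟨[(0, "CLASSIFICATION_INFO"), (1, "BBOX"), (2, "MASK"), (100, "CONTOURS")]⟩

-- loop body of A: 'if value in LUT: default_dict[LUT[value]] = True'
def pvStep (d : PySem.Dict String Bool) (value : Int) : PySem.Dict String Bool :=
  match PySem.Dict.get? pvLUT value with
  | some name => PySem.Dict.insert d name true
  | none => d

def reinterpret_request_datatypes (data_types : List Int) : Option (List (String × Bool)) :=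
  let default_dict : PySem.Dict String Bool :=
    ⟨[("CLASSIFICATION_INFO", false), ("BBOX", false), ("MASK", false), ("CONTOURS", false)]⟩
  if data_types = [] then none
  else
    some (data_types.foldl pvStep default_dict).items

-- ===== PORT B =====
def reinterpret_request_datatypes_alt (data_types : List Int) : Option (List (String × Bool)) :=
  if data_types = [] then none
  else
    let present : PySem.Set Int := PySem.Set.ofList data_types
    some (pvLUT.items.map (fun kv => (kv.2, PySem.Set.contains present kv.1)))

-- ===== PRECONDITION & SPEC =====
def Spec_reinterpret_request_datatypes (data_types : List Int) (out : Option (List (String × Bool))) : Prop := out = reinterpret_request_datatypes_alt data_types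
instance (data_types : List Int) (out : Option (List (String × Bool))) : Decidable (Spec_reinterpret_request_datatypes data_types out) := by unfold Spec_reinterpret_request_datatypes; infer_instance

-- ===== CLAIM (what is proved, stated in full; the proofs are below) =====
def Claim_equal_reinterpret_request_datatypes : Prop := ∀ (data_types : List Int), Dom_reinterpret_request_datatypes data_types → Spec_reinterpret_request_datatypes data_types (reinterpret_request_datatypes data_types)

-- ===== LEMMAS AND PROOFS =====

-- ===== VERDICT (by name: the statement is the Claim_ definition above) =====
-- One step of A's loop on the four-flag dict, for each relevant code and for any other code.
theorem pvStep_ne (b0 b1 b2 b3 : Bool) (v : Int) (h0 : v ≠ 0) (h1 : v ≠ 1) (h2 : v ≠ 2) (h3 : v ≠ 100) :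
    pvStep ⟨[("CLASSIFICATION_INFO", b0), ("BBOX", b1), ("MASK", b2), ("CONTOURS", b3)]⟩ v =
    ⟨[("CLASSIFICATION_INFO", b0), ("BBOX", b1), ("MASK", b2), ("CONTOURS", b3)]⟩ := by
  simp [pvStep, pvLUT, PySem.Dict.get?, Ne.symm h0, Ne.symm h1, Ne.symm h2, Ne.symm h3]

-- The four flags of A's loop, as a function of the four initial flags and memberships in the remaining input.
theorem pvFoldl_flags (l : List Int) (b0 b1 b2 b3 : Bool) :
    l.foldl pvStep ⟨[("CLASSIFICATION_INFO", b0), ("BBOX", b1), ("MASK", b2), ("CONTOURS", b3)]⟩ =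
    ⟨[("CLASSIFICATION_INFO", b0 || l.contains 0), ("BBOX", b1 || l.contains 1),
      ("MASK", b2 || l.contains 2), ("CONTOURS", b3 || l.contains 100)]⟩ := by
  induction l generalizing b0 b1 b2 b3 with
  | nil => simp
  | cons v t ih =>
    rw [List.foldl_cons]
    by_cases h0 : v = 0
    · subst h0
      have hs : pvStep ⟨[("CLASSIFICATION_INFO", b0), ("BBOX", b1), ("MASK", b2), ("CONTOURS", b3)]⟩ 0 =
          ⟨[("CLASSIFICATION_INFO", true), ("BBOX", b1), ("MASK", b2), ("CONTOURS", b3)]⟩ := rfl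
      rw [hs, ih]; simp
    · by_cases h1 : v = 1
      · subst h1
        have hs : pvStep ⟨[("CLASSIFICATION_INFO", b0), ("BBOX", b1), ("MASK", b2), ("CONTOURS", b3)]⟩ 1 =
            ⟨[("CLASSIFICATION_INFO", b0), ("BBOX", true), ("MASK", b2), ("CONTOURS", b3)]⟩ := rfl
        rw [hs, ih]; simp
      · by_cases h2 : v = 2
        · subst h2
          have hs : pvStep ⟨[("CLASSIFICATION_INFO", b0), ("BBOX", b1), ("MASK", b2), ("CONTOURS", b3)]⟩ 2 =
              ⟨[("CLASSIFICATION_INFO", b0), ("BBOX", b1), ("MASK", true), ("CONTOURS", b3)]⟩ := rfl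
          rw [hs, ih]; simp
        · by_cases h3 : v = 100
          · subst h3
            have hs : pvStep ⟨[("CLASSIFICATION_INFO", b0), ("BBOX", b1), ("MASK", b2), ("CONTOURS", b3)]⟩ 100 =
                ⟨[("CLASSIFICATION_INFO", b0), ("BBOX", b1), ("MASK", b2), ("CONTOURS", true)]⟩ := rfl
            rw [hs, ih]; simp
          · rw [pvStep_ne b0 b1 b2 b3 v h0 h1 h2 h3, ih]
            simp [Ne.symm h0, Ne.symm h1, Ne.symm h2, Ne.symm h3]

theorem reinterpret_request_datatypes_spec : Claim_equal_reinterpret_request_datatypes := by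
  intro l _
  unfold Spec_reinterpret_request_datatypes reinterpret_request_datatypes reinterpret_request_datatypes_alt
  by_cases h : l = []
  · simp [h]
  · simp only [h]
    rw [pvFoldl_flags]
    simp [pvLUT, PySem.Set.contains, PySem.Set.mem_ofList]
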